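-- pv_equiv track=rewrite | github.com/raboley/ado-mcp | ado/work_items/query_utils.py | build_wiql_from_filter
-- ===== SOURCE A (Python) =====
-- from typing import Any, Dict, Optional
--
-- def build_wiql_from_filter(simple_filter: Dict[str, Any]) -> str:
--     """
--     Build a WIQL query from simple filter parameters.
--
--     Args:
--         simple_filter: Dictionary of filter criteria
--
--     Returns:
--         WIQL query string
--     """
--     # Base SELECT clause with common fields
--     select_clause = (
--         "SELECT [System.Id], [System.Title], [System.WorkItemType], "
--         "[System.State], [System.AssignedTo], [System.CreatedDate], "
--         "[System.AreaPath], [System.IterationPath], [System.Tags] "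
--         "FROM WorkItems"
--     )
--
--     conditions = []
--
--     # Add conditions based on filter parameters
--     if "work_item_type" in simple_filter:
--         work_item_type = simple_filter["work_item_type"]
--         conditions.append(f"[System.WorkItemType] = '{work_item_type}'")
--
--     if "state" in simple_filter:
--         state = simple_filter["state"]
--         conditions.append(f"[System.State] = '{state}'")
--
--     if "assigned_to" in simple_filter:
--         assigned_to = simple_filter["assigned_to"]
--         conditions.append(f"[System.AssignedTo] = '{assigned_to}'")
--
--     if "area_path" in simple_filter:
--         area_path = simple_filter["area_path"]
--         conditions.append(f"[System.AreaPath] UNDER '{area_path}'")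
--
--     if "iteration_path" in simple_filter:
--         iteration_path = simple_filter["iteration_path"]
--         conditions.append(f"[System.IterationPath] UNDER '{iteration_path}'")
--
--     if "tags" in simple_filter:
--         tags = simple_filter["tags"]
--         # Handle both single tag and semicolon-separated tags
--         if ";" in tags:
--             tag_conditions = []
--             for tag in tags.split(";"):
--                 tag = tag.strip()
--                 if tag:
--                     tag_conditions.append(f"[System.Tags] CONTAINS '{tag}'")
--             if tag_conditions:
--                 conditions.append(f"({' OR '.join(tag_conditions)})")
--         else:
--             conditions.append(f"[System.Tags] CONTAINS '{tags.strip()}'")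
--
--     if "created_after" in simple_filter:
--         created_after = simple_filter["created_after"]
--         conditions.append(f"[System.CreatedDate] >= '{created_after}'")
--
--     if "created_before" in simple_filter:
--         created_before = simple_filter["created_before"]
--         conditions.append(f"[System.CreatedDate] <= '{created_before}'")
--
--     # Build final query
--     if conditions:
--         where_clause = " WHERE " + " AND ".join(conditions)
--         query = select_clause + where_clause
--     else:
--         query = select_clause
--
--     # Add ordering - use creation date for better recency sorting
--     if "created_after" in simple_filter or "created_before" in simple_filter:
--         # Date-filtered queries should show most recent first
--         query += " ORDER BY [System.CreatedDate] DESC"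
--     elif "assigned_to" in simple_filter:
--         # User-specific queries should show most recent first
--         query += " ORDER BY [System.CreatedDate] DESC"
--     else:
--         # Default to ID ordering for general queries
--         query += " ORDER BY [System.Id]"
--
--     return query
-- ===== SOURCE B (Python) =====
-- _SELECT = (
--     "SELECT [System.Id], [System.Title], [System.WorkItemType], "
--     "[System.State], [System.AssignedTo], [System.CreatedDate], "
--     "[System.AreaPath], [System.IterationPath], [System.Tags] "
--     "FROM WorkItems"
-- )
--
-- # rank of each recognised filter key in WIQL clause order
-- _RANK = {"work_item_type": 0, "state": 1, "assigned_to": 2, "area_path": 3,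
--          "iteration_path": 4, "tags": 5, "created_after": 6, "created_before": 7}
--
-- # field + operator for the simple (non-tags) keys
-- _SIMPLE = {"work_item_type": "[System.WorkItemType] =",
--            "state": "[System.State] =",
--            "assigned_to": "[System.AssignedTo] =",
--            "area_path": "[System.AreaPath] UNDER",
--            "iteration_path": "[System.IterationPath] UNDER",
--            "created_after": "[System.CreatedDate] >=",
--            "created_before": "[System.CreatedDate] <="}
--
--
-- def _condition(key, value):
--     """WIQL condition for one filter entry, or None (unknown key / empty tag list)."""
--     if key in _SIMPLE:
--         return f"{_SIMPLE[key]} '{value}'"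
--     if key != "tags":
--         return None
--     if ";" not in value:
--         return f"[System.Tags] CONTAINS '{value.strip()}'"
--     parts = [f"[System.Tags] CONTAINS '{t.strip()}'" for t in value.split(";") if t.strip()]
--     return f"({' OR '.join(parts)})" if parts else None
--
--
-- def build_wiql_from_filter(simple_filter):
--     """Build a WIQL query from simple filter parameters (data-driven: one pass
--     over the filter's own keys collecting (rank, condition), then sort by rank)."""
--     ranked = []
--     for key in simple_filter:
--         if key in _RANK:
--             cond = _condition(key, simple_filter[key])
--             if cond is not None:
--                 ranked.append((_RANK[key], cond))
--     ranked.sort(key=lambda rc: rc[0])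
--
--     query = _SELECT
--     if ranked:
--         query += " WHERE " + " AND ".join(cond for _, cond in ranked)
--     if any(k in simple_filter for k in ("created_after", "created_before", "assigned_to")):
--         return query + " ORDER BY [System.CreatedDate] DESC"
--     return query + " ORDER BY [System.Id]"
-- ===== Notes on version B (the rewrite author's own statement) =====
-- stated objective: alternative
-- what changed: Instead of A's fixed eight-branch probe of the dict in clause order, B makes one data-driven pass over the filter's own keys, mapping each recognised key through a rank/field table to a (rank, condition) pair, then sorts the collected pairs by rank and joins them; ORDER BY comes from an any() over the three triggering keys.
import Mathlib
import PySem

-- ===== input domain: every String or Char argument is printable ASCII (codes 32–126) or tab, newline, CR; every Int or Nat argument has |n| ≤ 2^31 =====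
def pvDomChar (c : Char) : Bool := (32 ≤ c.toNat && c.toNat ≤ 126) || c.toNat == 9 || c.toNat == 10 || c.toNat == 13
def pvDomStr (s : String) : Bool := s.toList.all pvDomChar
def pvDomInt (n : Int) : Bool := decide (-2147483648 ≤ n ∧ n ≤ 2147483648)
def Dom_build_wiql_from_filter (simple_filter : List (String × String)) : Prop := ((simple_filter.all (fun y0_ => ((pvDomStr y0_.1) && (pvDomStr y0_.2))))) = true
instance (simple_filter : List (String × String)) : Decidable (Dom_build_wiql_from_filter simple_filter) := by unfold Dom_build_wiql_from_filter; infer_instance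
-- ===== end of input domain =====

-- B replaces A's fixed eight-branch probe of the dict by one data-driven pass over the filter's own
-- keys collecting (rank, condition) pairs via a rank/field table, then sorts by rank and joins
-- (objective: alternative; same practical cost).


-- ===== PORT A =====
-- literal transliteration of A: eight sequential if-blocks appending to `conditions`,
-- then WHERE assembly, then the ORDER BY if/elif/else chain.
def build_wiql_from_filter (simple_filter : List (String × String)) : String :=
  let d := PySem.Dict.mk simple_filter
  let select_clause :=
    "SELECT [System.Id], [System.Title], [System.WorkItemType], [System.State], [System.AssignedTo], [System.CreatedDate], [System.AreaPath], [System.IterationPath], [System.Tags] FROM WorkItems"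
  let conditions : List String := []
  let conditions := match d.get? "work_item_type" with
    | some work_item_type => conditions ++ ["[System.WorkItemType] = '" ++ work_item_type ++ "'"]
    | none => conditions
  let conditions := match d.get? "state" with
    | some state => conditions ++ ["[System.State] = '" ++ state ++ "'"]
    | none => conditions
  let conditions := match d.get? "assigned_to" with
    | some assigned_to => conditions ++ ["[System.AssignedTo] = '" ++ assigned_to ++ "'"]
    | none => conditions
  let conditions := match d.get? "area_path" with
    | some area_path => conditions ++ ["[System.AreaPath] UNDER '" ++ area_path ++ "'"]
    | none => conditions
  let conditions := match d.get? "iteration_path" with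
    | some iteration_path => conditions ++ ["[System.IterationPath] UNDER '" ++ iteration_path ++ "'"]
    | none => conditions
  let conditions := match d.get? "tags" with
    | some tags =>
      if PySem.Str.isIn ";" tags then
        -- for tag in tags.split(";"): tag = tag.strip(); if tag: append …
        let tag_conditions := ((PySem.Str.split? tags ";").getD []).foldl
          (fun acc tag =>
            if PySem.Str.strip tag ≠ "" then
              acc ++ ["[System.Tags] CONTAINS '" ++ PySem.Str.strip tag ++ "'"]
            else acc) []
        if tag_conditions ≠ [] then
          conditions ++ ["(" ++ PySem.Str.join " OR " tag_conditions ++ ")"]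
        else conditions
      else
        conditions ++ ["[System.Tags] CONTAINS '" ++ PySem.Str.strip tags ++ "'"]
    | none => conditions
  let conditions := match d.get? "created_after" with
    | some created_after => conditions ++ ["[System.CreatedDate] >= '" ++ created_after ++ "'"]
    | none => conditions
  let conditions := match d.get? "created_before" with
    | some created_before => conditions ++ ["[System.CreatedDate] <= '" ++ created_before ++ "'"]
    | none => conditions
  let query :=
    if conditions ≠ [] then
      let where_clause := " WHERE " ++ PySem.Str.join " AND " conditions
      select_clause ++ where_clause
    else select_clause
  if (d.get? "created_after").isSome || (d.get? "created_before").isSome then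
    query ++ " ORDER BY [System.CreatedDate] DESC"
  else if (d.get? "assigned_to").isSome then
    query ++ " ORDER BY [System.CreatedDate] DESC"
  else
    query ++ " ORDER BY [System.Id]"

-- ===== PORT B =====
-- Source B's _RANK: rank of each recognised filter key in WIQL clause order
def pvRankTable : PySem.Dict String Int := PySem.Dict.mk
  [("work_item_type", 0), ("state", 1), ("assigned_to", 2), ("area_path", 3),
   ("iteration_path", 4), ("tags", 5), ("created_after", 6), ("created_before", 7)]

-- Source B's _SIMPLE: field + operator for the simple (non-tags) keys
def pvSimpleTable : PySem.Dict String String := PySem.Dict.mk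
  [("work_item_type", "[System.WorkItemType] ="),
   ("state", "[System.State] ="),
   ("assigned_to", "[System.AssignedTo] ="),
   ("area_path", "[System.AreaPath] UNDER"),
   ("iteration_path", "[System.IterationPath] UNDER"),
   ("created_after", "[System.CreatedDate] >="),
   ("created_before", "[System.CreatedDate] <=")]

-- the tag-condition comprehension from Source B's _condition
def pvTagParts (v : String) : List String :=
  (((PySem.Str.split? v ";").getD []).filter (fun t => PySem.Str.strip t ≠ "")).map
    (fun t => "[System.Tags] CONTAINS '" ++ PySem.Str.strip t ++ "'")

-- Source B's _condition(key, value): the WIQL condition, or none (unknown key / empty tag list)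
def pvCondition (key value : String) : Option String :=
  if pvSimpleTable.contains key then
    some (pvSimpleTable.getD key "" ++ " '" ++ value ++ "'")
  else if key ≠ "tags" then
    none
  else if ¬ PySem.Str.isIn ";" value then
    some ("[System.Tags] CONTAINS '" ++ PySem.Str.strip value ++ "'")
  else if pvTagParts value ≠ [] then
    some ("(" ++ PySem.Str.join " OR " (pvTagParts value) ++ ")")
  else none

-- Source B: one pass over the dict's own keys (`for key in simple_filter` iterates the DISTINCT keys in
-- first-occurrence order = PySem.Set.ofList of the key list; simple_filter[key] = first-match get?),
-- collecting (rank, condition); then sort by rank, join, and pick ORDER BY via any().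
def build_wiql_from_filter_alt (simple_filter : List (String × String)) : String :=
  let d := PySem.Dict.mk simple_filter
  let ranked := (PySem.Set.ofList (simple_filter.map Prod.fst)).foldl
    (fun acc key =>
      if pvRankTable.contains key then
        match (d.get? key).bind (pvCondition key) with
        | some cond => acc ++ [(pvRankTable.getD key 0, cond)]
        | none => acc
      else acc) []
  let ranked := PySem.List.sorted ranked (fun rc => rc.1)
  let query :=
    "SELECT [System.Id], [System.Title], [System.WorkItemType], [System.State], [System.AssignedTo], [System.CreatedDate], [System.AreaPath], [System.IterationPath], [System.Tags] FROM WorkItems"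
  let query :=
    if ranked ≠ [] then query ++ " WHERE " ++ PySem.Str.join " AND " (ranked.map (·.2)) else query
  if ["created_after", "created_before", "assigned_to"].any (fun k => d.contains k) then
    query ++ " ORDER BY [System.CreatedDate] DESC"
  else
    query ++ " ORDER BY [System.Id]"

-- ===== PRECONDITION & SPEC =====
def Spec_build_wiql_from_filter (simple_filter : List (String × String)) (out : String) : Prop := out = build_wiql_from_filter_alt simple_filter
instance (simple_filter : List (String × String)) (out : String) : Decidable (Spec_build_wiql_from_filter simple_filter out) := by unfold Spec_build_wiql_from_filter; infer_instance

-- ===== CLAIM (what is proved, stated in full; the proofs are below) =====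
def Claim_equal_build_wiql_from_filter : Prop := ∀ (simple_filter : List (String × String)), Dom_build_wiql_from_filter simple_filter → Spec_build_wiql_from_filter simple_filter (build_wiql_from_filter simple_filter)

-- ===== LEMMAS AND PROOFS =====

-- the eight recognised keys, in WIQL clause (= rank) order
def pvKeys : List String :=
  ["work_item_type", "state", "assigned_to", "area_path",
   "iteration_path", "tags", "created_after", "created_before"]

-- what B's loop contributes for key k: the ranked condition, if any
def pvG (d : PySem.Dict String String) (k : String) : Option (Int × String) :=
  if pvRankTable.contains k then
    (d.get? k).bind (fun v => (pvCondition k v).map (fun c => (pvRankTable.getD k 0, c)))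
  else none

theorem pv_filterMap_cons {α β : Type} (f : α → Option β) (a : α) (l : List α) :
    List.filterMap f (a :: l) = (f a).toList ++ List.filterMap f l := by
  cases h : f a <;> simp [h]

theorem pv_filterMap_eq_filter {α β : Type} (f : α → Option β) (l : List α) :
    l.filterMap f = (l.filter (fun a => (f a).isSome)).filterMap f := by
  induction l with
  | nil => rfl
  | cons a l ih => cases h : f a <;> simp [h, ih]

theorem pv_foldl_filterMap {α β : Type} (f : α → Option β) (l : List α) (acc : List β) :
    l.foldl (fun c k => c ++ (f k).toList) acc = acc ++ l.filterMap f := by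
  induction l generalizing acc with
  | nil => simp
  | cons a l ih => cases h : f a <;> simp [h, ih]

-- A's append-if loop over the split tags is B's filter-then-map
theorem pv_tags_fold (l : List String) :
    l.foldl (fun acc tag =>
      if PySem.Str.strip tag ≠ "" then
        acc ++ ["[System.Tags] CONTAINS '" ++ PySem.Str.strip tag ++ "'"]
      else acc) [] =
    ((l.filter (fun t => PySem.Str.strip t ≠ "")).map
      (fun t => "[System.Tags] CONTAINS '" ++ PySem.Str.strip t ++ "'")) := by
  simpa using PySem.List.foldl_append_if (fun t => decide (PySem.Str.strip t ≠ ""))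
    (fun t => "[System.Tags] CONTAINS '" ++ PySem.Str.strip t ++ "'") l []

-- each of A's if-blocks contributes exactly (pvG d k).toList.map (·.2)
theorem pv_stepA_wit (d : PySem.Dict String String) (c : List String) :
    (match d.get? "work_item_type" with
     | some v => c ++ ["[System.WorkItemType] = '" ++ v ++ "'"]
     | none => c) = c ++ ((pvG d "work_item_type").toList.map (·.2)) := by
  simp only [pvG]
  cases d.get? "work_item_type" with
  | none => simp
  | some v => simp [pvCondition, pvRankTable, pvSimpleTable]; rfl

theorem pv_stepA_state (d : PySem.Dict String String) (c : List String) :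
    (match d.get? "state" with
     | some v => c ++ ["[System.State] = '" ++ v ++ "'"]
     | none => c) = c ++ ((pvG d "state").toList.map (·.2)) := by
  simp only [pvG]
  cases d.get? "state" with
  | none => simp
  | some v => simp [pvCondition, pvRankTable, pvSimpleTable]; rfl

theorem pv_stepA_assigned (d : PySem.Dict String String) (c : List String) :
    (match d.get? "assigned_to" with
     | some v => c ++ ["[System.AssignedTo] = '" ++ v ++ "'"]
     | none => c) = c ++ ((pvG d "assigned_to").toList.map (·.2)) := by
  simp only [pvG]
  cases d.get? "assigned_to" with
  | none => simp
  | some v => simp [pvCondition, pvRankTable, pvSimpleTable]; rfl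

theorem pv_stepA_area (d : PySem.Dict String String) (c : List String) :
    (match d.get? "area_path" with
     | some v => c ++ ["[System.AreaPath] UNDER '" ++ v ++ "'"]
     | none => c) = c ++ ((pvG d "area_path").toList.map (·.2)) := by
  simp only [pvG]
  cases d.get? "area_path" with
  | none => simp
  | some v => simp [pvCondition, pvRankTable, pvSimpleTable]; rfl

theorem pv_stepA_iter (d : PySem.Dict String String) (c : List String) :
    (match d.get? "iteration_path" with
     | some v => c ++ ["[System.IterationPath] UNDER '" ++ v ++ "'"]
     | none => c) = c ++ ((pvG d "iteration_path").toList.map (·.2)) := by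
  simp only [pvG]
  cases d.get? "iteration_path" with
  | none => simp
  | some v => simp [pvCondition, pvRankTable, pvSimpleTable]; rfl

theorem pv_stepA_after (d : PySem.Dict String String) (c : List String) :
    (match d.get? "created_after" with
     | some v => c ++ ["[System.CreatedDate] >= '" ++ v ++ "'"]
     | none => c) = c ++ ((pvG d "created_after").toList.map (·.2)) := by
  simp only [pvG]
  cases d.get? "created_after" with
  | none => simp
  | some v => simp [pvCondition, pvRankTable, pvSimpleTable]; rfl

theorem pv_stepA_before (d : PySem.Dict String String) (c : List String) :
    (match d.get? "created_before" with
     | some v => c ++ ["[System.CreatedDate] <= '" ++ v ++ "'"]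
     | none => c) = c ++ ((pvG d "created_before").toList.map (·.2)) := by
  simp only [pvG]
  cases d.get? "created_before" with
  | none => simp
  | some v => simp [pvCondition, pvRankTable, pvSimpleTable]; rfl

theorem pv_cond_tags (v : String) :
    pvCondition "tags" v =
      (if PySem.Str.isIn ";" v then
        (if pvTagParts v ≠ [] then some ("(" ++ PySem.Str.join " OR " (pvTagParts v) ++ ")")
         else none)
       else some ("[System.Tags] CONTAINS '" ++ PySem.Str.strip v ++ "'")) := by
  simp only [pvCondition]
  rw [if_neg (by decide), if_neg (by decide)]
  cases h : PySem.Chars.isIn [';'] v.toList <;> simp [PySem.Str.isIn, h]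

theorem pv_stepA_tags (d : PySem.Dict String String) (c : List String) :
    (match d.get? "tags" with
     | some tags =>
       if PySem.Str.isIn ";" tags then
         let tag_conditions := ((PySem.Str.split? tags ";").getD []).foldl
           (fun acc tag =>
             if PySem.Str.strip tag ≠ "" then
               acc ++ ["[System.Tags] CONTAINS '" ++ PySem.Str.strip tag ++ "'"]
             else acc) []
         if tag_conditions ≠ [] then
           c ++ ["(" ++ PySem.Str.join " OR " tag_conditions ++ ")"]
         else c
       else
         c ++ ["[System.Tags] CONTAINS '" ++ PySem.Str.strip tags ++ "'"]
     | none => c) = c ++ ((pvG d "tags").toList.map (·.2)) := by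
  simp only [pvG]
  have hrank : pvRankTable.contains "tags" = true := rfl
  simp only [hrank, if_true]
  cases d.get? "tags" with
  | none => simp
  | some tags =>
    have hfold : ((PySem.Str.split? tags ";").getD []).foldl
        (fun acc tag =>
          if PySem.Str.strip tag ≠ "" then
            acc ++ ["[System.Tags] CONTAINS '" ++ PySem.Str.strip tag ++ "'"]
          else acc) [] = pvTagParts tags := pv_tags_fold _
    simp only [Option.bind_some, pv_cond_tags, hfold]
    cases h : PySem.Chars.isIn [';'] tags.toList with
    | true =>
      by_cases h2 : pvTagParts tags = []
      · simp [PySem.Str.isIn, h, h2]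
      · simp [PySem.Str.isIn, h, h2]
    | false => simp [PySem.Str.isIn, h]

-- B's fold collects exactly the pvG-images of the distinct keys
theorem pv_ranked_eq (simple_filter : List (String × String)) :
    ((PySem.Set.ofList (simple_filter.map Prod.fst)).foldl
      (fun acc key =>
        if pvRankTable.contains key then
          match ((PySem.Dict.mk simple_filter).get? key).bind (pvCondition key) with
          | some cond => acc ++ [(pvRankTable.getD key 0, cond)]
          | none => acc
        else acc) []) =
    (PySem.Set.ofList (simple_filter.map Prod.fst)).filterMap
      (pvG (PySem.Dict.mk simple_filter)) := by
  have hstep : (fun (acc : List (Int × String)) key =>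
      if pvRankTable.contains key then
        match ((PySem.Dict.mk simple_filter).get? key).bind (pvCondition key) with
        | some cond => acc ++ [(pvRankTable.getD key 0, cond)]
        | none => acc
      else acc) =
      (fun acc k => acc ++ (pvG (PySem.Dict.mk simple_filter) k).toList) := by
    funext acc k
    simp only [pvG]
    by_cases h : pvRankTable.contains k = true
    · simp only [h, if_true]
      cases hv : (PySem.Dict.mk simple_filter).get? k with
      | none => simp
      | some v => cases hc : pvCondition k v <;> simp [hc]
      
    · simp [h]
  rw [hstep]
  simpa using pv_foldl_filterMap (pvG (PySem.Dict.mk simple_filter))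
    (PySem.Set.ofList (simple_filter.map Prod.fst)) []

-- pvG's rank component is always the key's table rank
theorem pv_rank_of_G (d : PySem.Dict String String) (k : String) (x : Int × String)
    (h : pvG d k = some x) : x.1 = pvRankTable.getD k 0 := by
  unfold pvG at h
  by_cases hc : pvRankTable.contains k = true
  · simp only [hc, if_true] at h
    cases hv : d.get? k with
    | none => rw [hv] at h; simp at h
    | some v =>
      rw [hv] at h
      cases hcd : pvCondition k v with
      | none => simp [hcd] at h
      | some c => simp [hcd] at h; rw [← h]
  · simp [hc] at h

-- if pvG is some, the key is a recognised key present in the dict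
theorem pv_G_isSome_mem (d : PySem.Dict String String) (k : String)
    (h : (pvG d k).isSome = true) :
    k ∈ pvKeys ∧ (d.get? k).isSome = true := by
  unfold pvG at h
  by_cases hc : pvRankTable.contains k = true
  · constructor
    · rw [PySem.Dict.contains_eq_decide_mem_keys] at hc
      simp only [decide_eq_true_eq, pvRankTable] at hc
      simpa [pvKeys] using hc
    · simp only [hc, if_true] at h
      cases hv : d.get? k with
      | none => rw [hv] at h; simp at h
      | some v => simp
  · simp [hc] at h

-- the two key traversals (canonical order vs first-occurrence order) pick the same conditions
theorem pv_perm (simple_filter : List (String × String)) :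
    (pvKeys.filterMap (pvG (PySem.Dict.mk simple_filter))).Perm
      ((PySem.Set.ofList (simple_filter.map Prod.fst)).filterMap
        (pvG (PySem.Dict.mk simple_filter))) := by
  set d := PySem.Dict.mk simple_filter with hd
  set DK := PySem.Set.ofList (simple_filter.map Prod.fst) with hDK
  rw [pv_filterMap_eq_filter (pvG d) pvKeys, pv_filterMap_eq_filter (pvG d) DK]
  apply List.Perm.filterMap
  rw [List.perm_ext_iff_of_nodup
    (List.Nodup.filter _ (by decide))
    (List.Nodup.filter _ (PySem.Set.nodup_ofList _))]
  intro k
  simp only [List.mem_filter]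
  constructor
  · rintro ⟨_, hs⟩
    refine ⟨?_, hs⟩
    have := (pv_G_isSome_mem d k hs).2
    have hk : d.get? k ≠ none := by
      intro hn; rw [hn] at this; simp at this
    have hmem : k ∈ d.keys := by
      by_contra hnk
      exact hk ((PySem.Dict.get?_eq_none_iff_not_mem_keys d k).mpr hnk)
    have hkeys : d.keys = simple_filter.map Prod.fst := by
      simp [hd, PySem.Dict.keys]
    rw [hkeys] at hmem
    exact (PySem.Set.mem_ofList _ _).mpr hmem
  · rintro ⟨_, hs⟩
    exact ⟨(pv_G_isSome_mem d k hs).1, hs⟩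

-- ranks strictly increase along the canonical selection
theorem pv_pairwise (d : PySem.Dict String String) :
    (pvKeys.filterMap (pvG d)).Pairwise (fun a b => a.1 < b.1) := by
  rw [List.pairwise_filterMap]
  have base : pvKeys.Pairwise (fun a b => pvRankTable.getD a 0 < pvRankTable.getD b 0) := by
    decide
  refine base.imp ?_
  intro a b hab x hx y hy
  rw [pv_rank_of_G d a x hx, pv_rank_of_G d b y hy]
  exact hab

-- B's sort reorders its collection into exactly the canonical-order selection
theorem pv_sorted_eq (simple_filter : List (String × String)) :
    PySem.List.sorted
      ((PySem.Set.ofList (simple_filter.map Prod.fst)).filterMap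
        (pvG (PySem.Dict.mk simple_filter)))
      (fun rc => rc.1) =
    pvKeys.filterMap (pvG (PySem.Dict.mk simple_filter)) := by
  exact PySem.List.sorted_eq_of_perm_of_pairwise_lt _ _ _
    (pv_perm simple_filter) (pv_pairwise _)

-- dropping the ranks from the canonical selection gives A's condition list shape
theorem pv_map_snd (d : PySem.Dict String String) :
    (pvKeys.filterMap (pvG d)).map (·.2) =
      ((((((((([] : List String)
        ++ ((pvG d "work_item_type").toList.map (·.2)))
        ++ ((pvG d "state").toList.map (·.2)))
        ++ ((pvG d "assigned_to").toList.map (·.2)))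
        ++ ((pvG d "area_path").toList.map (·.2)))
        ++ ((pvG d "iteration_path").toList.map (·.2)))
        ++ ((pvG d "tags").toList.map (·.2)))
        ++ ((pvG d "created_after").toList.map (·.2)))
        ++ ((pvG d "created_before").toList.map (·.2))) := by
  simp [pvKeys, pv_filterMap_cons, List.map_append]

-- ===== VERDICT (by name: the statement is the Claim_ definition above) =====
set_option maxHeartbeats 1600000 in
set_option maxRecDepth 8000 in
theorem build_wiql_from_filter_spec : Claim_equal_build_wiql_from_filter := by
  intro sf _
  show build_wiql_from_filter sf = build_wiql_from_filter_alt sf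
  unfold build_wiql_from_filter build_wiql_from_filter_alt
  simp only [pv_stepA_wit, pv_stepA_state, pv_stepA_assigned, pv_stepA_area,
             pv_stepA_iter, pv_stepA_tags, pv_stepA_after, pv_stepA_before,
             pv_ranked_eq, pv_sorted_eq, ← pv_map_snd]
  by_cases h : pvKeys.filterMap (pvG (PySem.Dict.mk sf)) = [] <;>
  by_cases h1 : ((PySem.Dict.mk sf).get? "created_after").isSome = true <;>
  by_cases h2 : ((PySem.Dict.mk sf).get? "created_before").isSome = true <;>
  by_cases h3 : ((PySem.Dict.mk sf).get? "assigned_to").isSome = true <;>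
  simp [h, h1, h2, h3, PySem.Dict.contains_eq_isSome_get?, String.append_assoc] <;>
  rw [← String.append_assoc] <;> rfl
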